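-- pv_equiv track=rewrite | github.com/bogobogo/HotC | Machine_Learning/wav_utils.py | _split_into_channels
-- ===== SOURCE A (Python) =====
-- def _split_into_channels(data, number_of_channels, sample_width):
-- 	data_length = len(data)
-- 	if data_length % (number_of_channels * sample_width) != 0:
-- 		raise Exception("invalid length of data")
--
-- 	channels = []
-- 	for i in range(number_of_channels):
-- 		channels.append('')
--
-- 	next_channel = 0
-- 	cur_pos = 0
-- 	while cur_pos < data_length:
-- 		channels[next_channel] += data[cur_pos:cur_pos+sample_width]
-- 		next_channel += 1
-- 		if next_channel == number_of_channels:
-- 			next_channel = 0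
-- 		cur_pos += sample_width
--
-- 	return channels
-- ===== SOURCE B (Python) =====
-- def _split_into_channels(data, number_of_channels, sample_width):
-- 	data_length = len(data)
-- 	if data_length % (number_of_channels * sample_width) != 0:
-- 		raise Exception("invalid length of data")
--
-- 	stride = number_of_channels * sample_width
-- 	return [''.join(data[j:j + sample_width]
-- 	                for j in range(c * sample_width, data_length, stride))
-- 	        for c in range(number_of_channels)]
-- ===== Notes on version B (the rewrite author's own statement) =====
-- stated objective: simpler
-- what changed: Replaces the round-robin while loop that distributes blocks over a mutable channels list with a channel-major comprehension: each channel is built directly by joining the strided blocks data[j:j+sample_width] for j in range(c*sample_width, len(data), number_of_channels*sample_width).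
import Mathlib
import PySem

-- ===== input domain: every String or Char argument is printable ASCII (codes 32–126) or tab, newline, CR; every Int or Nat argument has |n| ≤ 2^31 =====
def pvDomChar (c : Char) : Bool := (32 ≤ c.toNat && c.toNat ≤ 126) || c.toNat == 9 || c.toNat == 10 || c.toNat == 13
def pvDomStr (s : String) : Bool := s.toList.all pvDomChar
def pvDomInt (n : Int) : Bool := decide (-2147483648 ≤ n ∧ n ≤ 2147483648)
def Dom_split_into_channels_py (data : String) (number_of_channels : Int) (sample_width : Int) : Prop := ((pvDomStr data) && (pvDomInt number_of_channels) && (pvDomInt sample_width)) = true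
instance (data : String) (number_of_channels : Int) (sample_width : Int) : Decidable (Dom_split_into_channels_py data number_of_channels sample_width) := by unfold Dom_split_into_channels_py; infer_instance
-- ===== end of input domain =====

-- B builds each channel directly (channel-major, strided gather + join) instead of A's
-- round-robin while loop mutating a channels list; objective: simpler decomposition.


-- ===== PORT A =====
-- strings are handled as lists of code points (PySem convention); String.ofList only repackages at the end

-- channels[next_channel] += blk ; in A next_channel is always 0 ≤ next_channel < len(channels)
-- inside Pre_; out of range Python raises IndexError (excluded by Pre_), here a no-op.
def pvSetAt (chs : List (List Char)) (i : Int) (blk : List Char) : List (List Char) :=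
  if 0 ≤ i then chs.modify i.toNat (fun s => s ++ blk) else chs

-- channels = []; for i in range(number_of_channels): channels.append('')
def pvInitChannels (n : Int) : List (List Char) :=
  (PySem.List.pyRange 0 n 1).foldl (fun acc _ => acc ++ [([] : List Char)]) []

-- the while loop; fuel bounds the iteration count (inside Pre_ the loop runs ≤ len(data) times)
def pvLoopA (L : List Char) (n w dlen : Int) : Nat → List (List Char) → Int → Int → List (List Char)
  | 0, chs, _, _ => chs
  | Nat.succ fuel, chs, nc, cur =>
    if cur < dlen then
      let chs' := pvSetAt chs nc (PySem.List.slice L (some cur) (some (cur + w)))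
      let nc' := if nc + 1 = n then 0 else nc + 1
      pvLoopA L n w dlen fuel chs' nc' (cur + w)
    else chs

def split_into_channels_py (data : String) (number_of_channels : Int) (sample_width : Int) : List String :=
  let L := data.toList
  let data_length : Int := (L.length : Int)
  -- Python raises here (Exception on bad length; ZeroDivisionError when n*w = 0): excluded by Pre_
  if PySem.Int.mod data_length (number_of_channels * sample_width) ≠ 0 then []
  else
    (pvLoopA L number_of_channels sample_width data_length (L.length + 1)
        (pvInitChannels number_of_channels) 0 0).map (fun s => String.ofList s)

-- ===== PORT B =====
def split_into_channels_py_alt (data : String) (number_of_channels : Int) (sample_width : Int) : List String :=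
  let L := data.toList
  let data_length : Int := (L.length : Int)
  if PySem.Int.mod data_length (number_of_channels * sample_width) ≠ 0 then []
  else
    let stride := number_of_channels * sample_width
    (PySem.List.pyRange 0 number_of_channels 1).map (fun c =>
      String.ofList (((PySem.List.pyRange (c * sample_width) data_length stride).map
        (fun j => PySem.List.slice L (some j) (some (j + sample_width)))).flatten))

-- ===== PRECONDITION & SPEC =====
-- Pre_ = exactly the inputs where Python A returns: the length guard passes without ZeroDivisionError
-- (n*w ≠ 0 and len % (n*w) == 0), and the while loop terminates without IndexError (vacuously when
-- data is empty, otherwise requiring number_of_channels ≥ 1 and sample_width ≥ 1).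
def Pre_split_into_channels_py (data : String) (number_of_channels : Int) (sample_width : Int) : Prop :=
  number_of_channels * sample_width ≠ 0 ∧
  PySem.Int.mod ((data.toList.length : Int)) (number_of_channels * sample_width) = 0 ∧
  (data.toList = [] ∨ (1 ≤ number_of_channels ∧ 1 ≤ sample_width))
instance (data : String) (number_of_channels : Int) (sample_width : Int) : Decidable (Pre_split_into_channels_py data number_of_channels sample_width) := by unfold Pre_split_into_channels_py; infer_instance

def pvWitness_split_into_channels_py : String × Int × Int := ("abcdef", 2, 1)

def Spec_split_into_channels_py (data : String) (number_of_channels : Int) (sample_width : Int) (out : List String) : Prop := out = split_into_channels_py_alt data number_of_channels sample_width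
instance (data : String) (number_of_channels : Int) (sample_width : Int) (out : List String) : Decidable (Spec_split_into_channels_py data number_of_channels sample_width out) := by unfold Spec_split_into_channels_py; infer_instance

-- ===== CLAIM (what is proved, stated in full; the proofs are below) =====
def Claim_equal_split_into_channels_py : Prop := ∀ (data : String) (number_of_channels : Int) (sample_width : Int), Dom_split_into_channels_py data number_of_channels sample_width → Pre_split_into_channels_py data number_of_channels sample_width → Spec_split_into_channels_py data number_of_channels sample_width (split_into_channels_py data number_of_channels sample_width)

-- ===== LEMMAS AND PROOFS =====

-- proof-side abstractions: block t, channel contents after t blocks, the whole channels list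
def pvBlk (L : List Char) (w t : Nat) : List Char := (L.drop (t * w)).take w
def pvChan (L : List Char) (w n t c : Nat) : List Char :=
  (((List.range t).filter (fun u => u % n = c)).map (pvBlk L w)).flatten
def pvF (L : List Char) (w n t : Nat) : List (List Char) := (List.range n).map (pvChan L w n t)

theorem pvInitChannels_eq (n : Int) : pvInitChannels n = List.replicate n.toNat [] := by
  unfold pvInitChannels
  by_cases h : n ≤ 0
  · rw [PySem.List.pyRange_one_eq_nil h]
    simp [Int.toNat_of_nonpos h]
  · have h' : 0 ≤ n := by omega
    obtain ⟨n', rfl⟩ : ∃ k : Nat, n = (k : Int) := ⟨n.toNat, (Int.toNat_of_nonneg h').symm⟩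
    rw [PySem.List.pyRange_zero_natCast, PySem.List.foldl_append_singleton_eq_map]
    simp [List.map_map, Function.comp_def, List.map_const']

theorem pvF_zero (L : List Char) (w n : Nat) : pvF L w n 0 = List.replicate n [] := by
  have h : pvChan L w n 0 = fun _ => ([] : List Char) := by funext c; simp [pvChan]
  simp [pvF, h, List.map_const']

theorem pvF_step (L : List Char) (w n t : Nat) :
    (pvF L w n t).modify (t % n) (fun s => s ++ pvBlk L w t) = pvF L w n (t + 1) := by
  apply List.ext_getElem
  · simp [pvF]
  · intro i h1 h2
    rw [List.getElem_modify]
    simp only [pvF, List.getElem_map, List.getElem_range]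
    by_cases hEq : t % n = i
    · rw [if_pos hEq]
      unfold pvChan
      rw [List.range_succ, List.filter_append, List.map_append, List.flatten_append]
      simp [hEq]
    · rw [if_neg hEq]
      unfold pvChan
      rw [List.range_succ, List.filter_append]
      simp [hEq]

theorem pvSucc_mod (t n : Nat) (hn : 0 < n) :
    (t + 1) % n = if t % n + 1 = n then 0 else t % n + 1 := by
  have hr : t % n < n := Nat.mod_lt t hn
  by_cases h1 : n = 1
  · subst h1; simp [Nat.mod_one]
  · have h2 : 1 < n := by omega
    rw [Nat.add_mod, Nat.mod_eq_of_lt h2]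
    by_cases he : t % n + 1 = n
    · rw [he]; simp
    · rw [Nat.mod_eq_of_lt (by omega), if_neg he]

theorem pvLoopA_spec (L : List Char) (n w m : Nat) (hn : 0 < n) (hw : 0 < w)
    (hlen : L.length = m * w) :
    ∀ (fuel t : Nat), m ≤ t + fuel → t ≤ m →
      pvLoopA L (n : Int) (w : Int) (L.length : Int) fuel (pvF L w n t)
        ((t % n : Nat) : Int) ((t * w : Nat) : Int) = pvF L w n m := by
  intro fuel
  induction fuel with
  | zero =>
    intro t h1 h2
    have : t = m := by omega
    subst this
    simp [pvLoopA]
  | succ fuel ih =>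
    intro t h1 h2
    rcases eq_or_lt_of_le h2 with rfl | hlt
    · have hcond : ¬ (((t * w : Nat) : Int) < (L.length : Int)) := by
        rw [hlen]
        intro hcontra
        have : t * w < t * w := by exact_mod_cast hcontra
        omega
      simp only [pvLoopA, if_neg hcond]
    · have hcond : ((t * w : Nat) : Int) < (L.length : Int) := by
        rw [hlen]; exact_mod_cast (Nat.mul_lt_mul_right hw).mpr hlt
      simp only [pvLoopA, if_pos hcond]
      have hset : pvSetAt (pvF L w n t) ((t % n : Nat) : Int)
          (PySem.List.slice L (some ((t * w : Nat) : Int)) (some (((t * w : Nat) : Int) + (w : Int))))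
          = pvF L w n (t + 1) := by
        unfold pvSetAt
        rw [if_pos (Int.natCast_nonneg _), Int.toNat_natCast]
        rw [PySem.List.slice_natCast_add L (t * w) w]
        exact pvF_step L w n t
      rw [hset]
      have hnc : (if ((t % n : Nat) : Int) + 1 = (n : Int) then 0 else ((t % n : Nat) : Int) + 1)
          = (((t + 1) % n : Nat) : Int) := by
        rw [pvSucc_mod t n hn]
        split_ifs with ha hb hb <;> push_cast at * <;> omega
      rw [hnc]
      have hcur : ((t * w : Nat) : Int) + (w : Int) = (((t + 1) * w : Nat) : Int) := by
        push_cast; ring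
      rw [hcur]
      exact ih (t + 1) (by omega) (by omega)

theorem pvFilter_range_eq (k c : Nat) :
    (List.range k).filter (fun r => decide (r = c)) = if c < k then [c] else [] := by
  induction k with
  | zero => simp
  | succ k ih =>
    rw [List.range_succ, List.filter_append, ih]
    by_cases h : k = c
    · subst h; simp
    · simp only [List.filter_cons, List.filter_nil, decide_eq_true_eq, if_neg h]
      split_ifs with h1 h2 h2 <;> simp <;> omega

-- (range (q*n)).filter (· % n = c) = [c, c+n, …] for c < n
theorem pvFilter_range_mul (n c q : Nat) (hc : c < n) :
    (List.range (q * n)).filter (fun u => u % n = c) =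
      (List.range q).map (fun k => c + k * n) := by
  induction q with
  | zero => simp
  | succ q ih =>
    have hsplit : (q + 1) * n = q * n + n := by ring
    rw [hsplit, List.range_add, List.filter_append, ih, List.range_succ, List.map_append]
    congr 1
    · rw [List.filter_map]
      simp only [Function.comp_def]
      have hcongr : ∀ r ∈ List.range n,
          (decide ((q * n + r) % n = c)) = decide (r = c) := by
        intro r hr
        have hrn : r < n := List.mem_range.mp hr
        have : (q * n + r) % n = r := by
          rw [Nat.add_comm, Nat.add_mul_mod_self_right]
          exact Nat.mod_eq_of_lt hrn
        simp [this]
      rw [List.filter_congr hcongr, pvFilter_range_eq, if_pos hc]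
      simp [Nat.add_comm]

theorem pvCount_eq (n w c q : Nat) (hn : 0 < n) (hw : 0 < w) (hc : c < n) :
    ((((q * n * w : Nat) : Int) - ((c : Int) * (w : Int)) + (n : Int) * (w : Int) - 1) / ((n : Int) * (w : Int))).toNat = q := by
  have hnw : (0 : Int) < (n : Int) * (w : Int) := by exact_mod_cast Nat.mul_pos hn hw
  have hcw : (c : Int) * (w : Int) < (n : Int) * (w : Int) := by
    have : (c : Int) < (n : Int) := by exact_mod_cast hc
    exact mul_lt_mul_of_pos_right this (by exact_mod_cast hw)
  have hcw0 : (0 : Int) ≤ (c : Int) * (w : Int) := by positivity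
  have hx : (((q * n * w : Nat) : Int) - ((c : Int) * (w : Int)) + (n : Int) * (w : Int) - 1)
      = ((n : Int) * (w : Int) - (c : Int) * (w : Int) - 1) + (q : Int) * ((n : Int) * (w : Int)) := by
    push_cast; ring
  rw [hx, Int.add_mul_ediv_right _ _ (ne_of_gt hnw)]
  rw [Int.ediv_eq_zero_of_lt (by omega) (by omega)]
  simp

-- ===== VERDICT (by name: the statement is the Claim_ definition above) =====
theorem split_into_channels_py_spec : Claim_equal_split_into_channels_py := by
  intro data n w _hdom hpre
  obtain ⟨hnw, hmod, hcase⟩ := hpre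
  unfold Spec_split_into_channels_py
  simp only [split_into_channels_py, split_into_channels_py_alt, hmod, ne_eq,
    not_true_eq_false, if_false]
  rcases hcase with hL | ⟨hn1, hw1⟩
  · -- empty data: A returns number_of_channels copies of "", and so does B
    simp only [hL, List.length_nil, Nat.cast_zero, Nat.zero_add]
    have hA : pvLoopA ([] : List Char) n w 0 (0 + 1) (pvInitChannels n) 0 0
        = pvInitChannels n := by
      rw [show (0 + 1 : Nat) = Nat.succ 0 from rfl, pvLoopA, if_neg (lt_irrefl (0 : Int))]
    rw [hA, pvInitChannels_eq, List.map_replicate]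
    by_cases hn0 : n ≤ 0
    · rw [PySem.List.pyRange_one_eq_nil hn0]
      simp [Int.toNat_of_nonpos hn0]
    · rw [not_le] at hn0
      have hw0 : w ≠ 0 := fun h => hnw (by rw [h, mul_zero])
      apply List.ext_getElem
      · simp [PySem.List.length_pyRange_one]
      · intro i h1 h2
        simp only [List.getElem_map, List.getElem_replicate]
        rw [List.length_map] at h2
        have hmem : (PySem.List.pyRange 0 n 1)[i] ∈ PySem.List.pyRange 0 n 1 :=
          List.getElem_mem h2
        obtain ⟨hc0, -⟩ := PySem.List.mem_pyRange_one.mp hmem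
        rcases lt_or_gt_of_ne hw0 with hwneg | hwpos
        · have hs : n * w < 0 := mul_neg_of_pos_of_neg hn0 hwneg
          rw [PySem.List.pyRange_of_neg _ _ hs,
            if_neg (not_lt.mpr (mul_nonpos_of_nonneg_of_nonpos hc0 hwneg.le))]
          simp
        · have hs : 0 < n * w := mul_pos hn0 hwpos
          rw [PySem.List.pyRange_of_pos _ _ hs,
            if_neg (not_lt.mpr (mul_nonneg hc0 hwpos.le))]
          simp
  · -- nonempty or not: 1 ≤ n, 1 ≤ w
    obtain ⟨n', rfl⟩ : ∃ k : Nat, n = (k : Int) := ⟨n.toNat, (Int.toNat_of_nonneg (by omega)).symm⟩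
    obtain ⟨w', rfl⟩ : ∃ k : Nat, w = (k : Int) := ⟨w.toNat, (Int.toNat_of_nonneg (by omega)).symm⟩
    have hn' : 0 < n' := by exact_mod_cast hn1
    have hw' : 0 < w' := by exact_mod_cast hw1
    have hdvdZ : ((n' : Int) * (w' : Int)) ∣ (data.toList.length : Int) :=
      (PySem.Int.mod_eq_zero_iff_dvd _ _).mp hmod
    have hdvd : (n' * w') ∣ data.toList.length := by exact_mod_cast hdvdZ
    obtain ⟨q, hq⟩ := hdvd
    set L := data.toList with hLdef
    have hlen : L.length = (q * n') * w' := by rw [hq]; ring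
    have h0 : pvInitChannels ((n' : Nat) : Int) = pvF L w' n' 0 := by
      rw [pvInitChannels_eq, pvF_zero, Int.toNat_natCast]
    have hfuel : q * n' ≤ 0 + (L.length + 1) := by
      have h := Nat.le_mul_of_pos_right (q * n') hw'
      omega
    have hA := pvLoopA_spec L n' w' (q * n') hn' hw' hlen (L.length + 1) 0 hfuel (Nat.zero_le _)
    simp only [Nat.zero_mod, Nat.zero_mul, Nat.cast_zero] at hA
    rw [h0, hA]
    rw [PySem.List.pyRange_zero_natCast, List.map_map]
    unfold pvF
    rw [List.map_map]
    apply List.map_congr_left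
    intro c hc
    have hcn : c < n' := List.mem_range.mp hc
    simp only [Function.comp_apply]
    have hs : (0 : Int) < (n' : Int) * (w' : Int) := by exact_mod_cast Nat.mul_pos hn' hw'
    rcases Nat.eq_zero_or_pos q with rfl | hq1
    · have hL0 : L.length = 0 := by simpa using hlen
      rw [PySem.List.pyRange_of_pos _ _ hs,
        if_neg (by rw [hL0]; exact not_lt.mpr (by positivity))]
      simp [pvChan]
    · have hcm : c < q * n' := lt_of_lt_of_le hcn (Nat.le_mul_of_pos_left n' hq1)
      rw [PySem.List.pyRange_of_pos _ _ hs]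
      have hab : ((c : Int) * (w' : Int)) < (L.length : Int) := by
        rw [hlen]; exact_mod_cast (Nat.mul_lt_mul_right hw').mpr hcm
      rw [if_pos hab]
      have hcount : (((L.length : Int) - (c : Int) * (w' : Int) + (n' : Int) * (w' : Int) - 1)
          / ((n' : Int) * (w' : Int))).toNat = q := by
        rw [hlen]
        exact pvCount_eq n' w' c q hn' hw' hcn
      rw [hcount]
      unfold pvChan
      rw [pvFilter_range_mul n' c q hcn, List.map_map, List.map_map]
      refine congrArg _ (congrArg _ (List.map_congr_left ?_))
      intro k _hk
      simp only [Function.comp_apply]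
      have harg : ((c : Int) * (w' : Int) + (n' : Int) * (w' : Int) * (k : Int))
          = (((c + k * n') * w' : Nat) : Int) := by push_cast; ring
      rw [harg, PySem.List.slice_natCast_add]
      rfl
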